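-- pv_equiv track=rewrite | github.com/renatocampos07/api_agent_contract_analyser_poc | backend/app/analysis/docx_comments.py | _collapse_double_dots
-- ===== SOURCE A (Python) =====
-- from typing import Dict, List, Optional, Tuple
--
-- def _collapse_double_dots(chars: List[str], mapping: List[int]) -> Tuple[List[str], List[int]]:
--     result_chars: List[str] = []
--     result_map: List[int] = []
--     i = 0
--     while i < len(chars):
--         if (
--             chars[i] == '.'
--             and i + 1 < len(chars)
--             and chars[i + 1] == '.'
--             and (i == 0 or chars[i - 1] != '.')
--             and (i + 2 >= len(chars) or chars[i + 2] != '.')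
--         ):
--             result_chars.append('.')
--             result_map.append(mapping[i])
--             i += 2
--             continue
--         result_chars.append(chars[i])
--         result_map.append(mapping[i])
--         i += 1
--     return result_chars, result_map
-- ===== SOURCE B (Python) =====
-- from typing import Dict, List, Optional, Tuple
--
-- def _collapse_double_dots(chars: List[str], mapping: List[int]) -> Tuple[List[str], List[int]]:
--     # Run-length pass: group maximal runs of '.'; collapse a run iff its length is exactly 2.
--     result_chars: List[str] = []
--     result_map: List[int] = []
--     n = len(chars)
--     i = 0
--     while i < n:
--         if chars[i] != '.':
--             result_chars.append(chars[i])
--             result_map.append(mapping[i])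
--             i += 1
--             continue
--         j = i
--         while j < n and chars[j] == '.':
--             j += 1
--         if j - i == 2:
--             result_chars.append('.')
--             result_map.append(mapping[i])
--         else:
--             for k in range(i, j):
--                 result_chars.append('.')
--                 result_map.append(mapping[k])
--         i = j
--     return result_chars, result_map
-- ===== Notes on version B (the rewrite author's own statement) =====
-- stated objective: alternative
-- what changed: B scans maximal runs of consecutive dots and collapses a run iff its length is exactly 2, instead of A's per-position test with lookahead and lookbehind.
import Mathlib
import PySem

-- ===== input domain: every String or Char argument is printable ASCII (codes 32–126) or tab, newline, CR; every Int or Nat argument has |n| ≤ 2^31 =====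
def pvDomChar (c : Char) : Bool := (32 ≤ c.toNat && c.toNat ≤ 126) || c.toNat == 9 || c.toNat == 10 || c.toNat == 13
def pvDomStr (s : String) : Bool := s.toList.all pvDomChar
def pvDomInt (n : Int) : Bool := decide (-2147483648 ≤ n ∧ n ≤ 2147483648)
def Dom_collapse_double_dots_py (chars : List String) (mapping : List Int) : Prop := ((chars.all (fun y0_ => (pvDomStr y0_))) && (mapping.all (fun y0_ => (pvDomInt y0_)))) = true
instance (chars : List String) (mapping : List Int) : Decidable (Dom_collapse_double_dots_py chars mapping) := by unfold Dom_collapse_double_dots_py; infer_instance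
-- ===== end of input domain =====

-- B replaces A's per-position lookahead/lookbehind test by a maximal-run-of-dots grouping pass (alternative decomposition, same cost).


-- ===== PORT A =====
-- A's while loop over index i, stepping by 2 on a collapse and 1 otherwise; the two
-- result lists are built by the recursion (cons in place of append at each step).
-- Indices are the loop counter (always ≥ 0) so List.getD is exact; mapping.getD is
-- only reached in range on inputs satisfying Pre_ (outside it Python A raises IndexError).
def aLoop (chars : List String) (mapping : List Int) (i : Nat) : List String × List Int :=
  if _h : i < chars.length then
    if chars.getD i "" = "." ∧ i + 1 < chars.length ∧ chars.getD (i+1) "" = "."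
        ∧ (i = 0 ∨ chars.getD (i-1) "" ≠ ".")
        ∧ (i + 2 ≥ chars.length ∨ chars.getD (i+2) "" ≠ ".") then
      let rest := aLoop chars mapping (i+2)
      ("." :: rest.1, mapping.getD i 0 :: rest.2)
    else
      let rest := aLoop chars mapping (i+1)
      (chars.getD i "" :: rest.1, mapping.getD i 0 :: rest.2)
  else ([], [])
termination_by chars.length - i

def collapse_double_dots_py (chars : List String) (mapping : List Int) : List String × List Int :=
  aLoop chars mapping 0

-- ===== PORT B =====
-- length of the leading run of "." (B's inner `while j < n and chars[j] == '.'` scan)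
def countDots : List String → Nat
  | [] => 0
  | c :: rest => if c = "." then countDots rest + 1 else 0

-- B's outer loop: consume one character or one whole maximal dot-run per step
def bLoop (mapping : List Int) (l : List String) (i : Nat) : List String × List Int :=
  match l with
  | [] => ([], [])
  | c :: rest =>
    if c ≠ "." then
      let r := bLoop mapping rest (i+1)
      (c :: r.1, mapping.getD i 0 :: r.2)
    else
      let run := countDots rest + 1
      let tail := bLoop mapping (rest.drop (run - 1)) (i + run)
      if run = 2 then ("." :: tail.1, mapping.getD i 0 :: tail.2)
      else (List.replicate run "." ++ tail.1,
            (List.range run).map (fun k => mapping.getD (i+k) 0) ++ tail.2)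
termination_by l.length
decreasing_by
  all_goals simp [List.length_drop]

def collapse_double_dots_py_alt (chars : List String) (mapping : List Int) : List String × List Int :=
  bLoop mapping chars 0

-- ===== PRECONDITION & SPEC =====
-- Python A raises IndexError when some emitted position has no mapping entry: exactly
-- when len(chars) > len(mapping), except that when len(chars) = len(mapping)+1 and the
-- last two chars form a collapsed (exactly-double) dot pair, the last index is skipped
-- and A returns normally.
def Pre_collapse_double_dots_py (chars : List String) (mapping : List Int) : Prop :=
  chars.length ≤ mapping.length ∨
    (chars.length = mapping.length + 1 ∧ 2 ≤ chars.length
      ∧ chars.getD (chars.length - 1) "" = "." ∧ chars.getD (chars.length - 2) "" = "."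
      ∧ (chars.length = 2 ∨ chars.getD (chars.length - 3) "" ≠ "."))
instance (chars : List String) (mapping : List Int) : Decidable (Pre_collapse_double_dots_py chars mapping) := by unfold Pre_collapse_double_dots_py; infer_instance

def pvWitness_collapse_double_dots_py : List String × List Int := (["a", ".", ".", "b"], [0, 1, 2, 3])

def Spec_collapse_double_dots_py (chars : List String) (mapping : List Int) (out : List String × List Int) : Prop := out = collapse_double_dots_py_alt chars mapping
instance (chars : List String) (mapping : List Int) (out : List String × List Int) : Decidable (Spec_collapse_double_dots_py chars mapping out) := by unfold Spec_collapse_double_dots_py; infer_instance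

-- ===== CLAIM (what is proved, stated in full; the proofs are below) =====
def Claim_equal_collapse_double_dots_py : Prop := ∀ (chars : List String) (mapping : List Int), Dom_collapse_double_dots_py chars mapping → Pre_collapse_double_dots_py chars mapping → Spec_collapse_double_dots_py chars mapping (collapse_double_dots_py chars mapping)

-- ===== LEMMAS AND PROOFS =====

lemma getD_drop (l : List String) (i k : Nat) :
    (l.drop i).getD k "" = l.getD (i+k) "" := by
  simp [List.getD, List.getElem?_drop]

lemma countDots_le (l : List String) : countDots l ≤ l.length := by
  induction l with
  | nil => simp [countDots]
  | cons c rest ih => simp [countDots]; split <;> omega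

lemma countDots_dots (l : List String) : ∀ k < countDots l, l.getD k "" = "." := by
  induction l with
  | nil => simp [countDots]
  | cons c rest ih =>
    intro k hk
    simp [countDots] at hk
    split at hk
    · cases k with
      | zero => simpa using ‹c = "."›
      | succ k' => simpa using ih k' (by omega)
    · omega

lemma countDots_stop (l : List String) : l.getD (countDots l) "" ≠ "." := by
  induction l with
  | nil => simp [countDots, List.getD]
  | cons c rest ih =>
    simp only [countDots]
    split
    · simpa using ih
    · simpa [List.getD] using ‹¬ c = "."›

lemma countDots_cons_dot (rest : List String) :
    countDots ("." :: rest) = countDots rest + 1 := by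
  simp [countDots]

lemma map_shift (mapping : List Int) (j t : Nat) :
    List.map (fun k => mapping.getD (j+k) 0) (List.range (t+1)) =
      mapping.getD j 0 :: List.map (fun k => mapping.getD (j+1+k) 0) (List.range t) := by
  have h : ∀ k, j + 1 + k = j + (k + 1) := fun k => by omega
  simp [List.range_succ_eq_map, List.map_map, Function.comp_def, h]

-- inside a dot run (previous char is '.'), A emits every dot singly
lemma aLoop_midRun (chars : List String) (mapping : List Int) :
    ∀ t j, 1 ≤ j → chars.getD (j-1) "" = "." → (∀ k < t, chars.getD (j+k) "" = ".") →
      aLoop chars mapping j =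
        (List.replicate t "." ++ (aLoop chars mapping (j+t)).1,
         (List.range t).map (fun k => mapping.getD (j+k) 0) ++ (aLoop chars mapping (j+t)).2) := by
  intro t
  induction t with
  | zero => intro j _ _ _; simp
  | succ t ih =>
    intro j hj hprev hdots
    have hd : chars.getD j "" = "." := by simpa using hdots 0 (by omega)
    have hjlen : j < chars.length := by
      by_contra h
      simp [List.getD, List.getElem?_eq_none (by omega : chars.length ≤ j)] at hd
    rw [aLoop]
    simp only [hjlen, dif_pos]
    rw [if_neg (by
      rintro ⟨-, -, -, hb, -⟩
      rcases hb with h0 | hne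
      · omega
      · exact hne hprev)]
    have ih' := ih (j+1) (by omega) (by simpa using hd)
      (fun k hk => by
        have := hdots (k+1) (by omega)
        rwa [show j + (k+1) = j + 1 + k by omega] at this)
    rw [ih']
    have harith : j + 1 + t = j + (t+1) := by omega
    rw [harith, map_shift]
    simp only [List.getD] at hd
    simp [hd, List.replicate_succ]

-- main invariant: at any position not strictly inside a dot run, A's loop agrees with
-- B's run-grouping loop on the corresponding suffix
lemma aLoop_eq_bLoop (chars : List String) (mapping : List Int) :
    ∀ fuel i, chars.length - i ≤ fuel →
      (i = 0 ∨ chars.getD (i-1) "" ≠ "." ∨ chars.getD i "" ≠ ".") →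
      aLoop chars mapping i = bLoop mapping (chars.drop i) i := by
  intro fuel
  induction fuel with
  | zero =>
    intro i hle _
    have : chars.length ≤ i := by omega
    rw [aLoop]
    simp [List.drop_eq_nil_of_le this, bLoop, dif_neg (by omega : ¬ i < chars.length)]
  | succ fuel ih =>
    intro i hle hinv
    by_cases hlen : i < chars.length
    · -- suffix is nonempty
      obtain ⟨c, rest, hsuffix⟩ : ∃ c rest, chars.drop i = c :: rest := by
        have h : chars.drop i ≠ [] := by simp [List.drop_eq_nil_iff]; omega
        cases hd : chars.drop i with
        | nil => exact absurd hd h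
        | cons c rest => exact ⟨c, rest, rfl⟩
      have hc : chars.getD i "" = c := by
        have := getD_drop chars i 0
        simp [hsuffix] at this; simpa using this.symm
      by_cases hdot : c = "."
      · -- dot run starts at i (invariant rules out mid-run)
        subst hdot
        set r := countDots (chars.drop i) with hr
        have hr1 : r = countDots rest + 1 := by rw [hr, hsuffix, countDots_cons_dot]
        have hrle : r ≤ chars.length - i := by
          have := countDots_le (chars.drop i); simpa [List.length_drop] using this
        have hdots : ∀ k < r, chars.getD (i+k) "" = "." := by
          intro k hk
          have := countDots_dots (chars.drop i) k hk
          rwa [getD_drop] at this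
        have hstop : chars.getD (i+r) "" ≠ "." := by
          have := countDots_stop (chars.drop i)
          rwa [getD_drop] at this
        have hdrop : rest.drop (r - 1) = chars.drop (i + r) := by
          have h2 : chars.drop (i + r) = (chars.drop i).drop r := by
            rw [List.drop_drop]
          rw [h2, hsuffix, hr1]
          simp
        have hinv' : (i+r) = 0 ∨ chars.getD (i+r-1) "" ≠ "." ∨ chars.getD (i+r) "" ≠ "." := by
          right; right; exact hstop
        have hprevok : i = 0 ∨ chars.getD (i-1) "" ≠ "." := by
          rcases hinv with h | h | h
          · left; exact h
          · right; exact h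
          · exact absurd hc h
        have ihtail := ih (i + r) (by omega) hinv'
        rw [hsuffix, bLoop]
        simp only [if_neg (by simp : ¬ ("." : String) ≠ "."), ← hr1, hdrop]
        by_cases hr2 : r = 2
        · -- exactly-double run: both collapse
          have h1 : chars.getD (i+1) "" = "." := hdots 1 (by omega)
          have hi1 : i + 1 < chars.length := by omega
          rw [aLoop]
          simp only [hlen, dif_pos]
          rw [if_pos ⟨hc, hi1, h1, hprevok, by
            by_cases h2 : i + 2 ≥ chars.length
            · left; exact h2
            · right; rw [hr2] at hstop; exact hstop⟩]
          rw [hr2] at ihtail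
          rw [if_pos hr2, ihtail, hr2]
        · rcases Nat.lt_or_ge r 2 with hrlt | hrge
          · -- run of length 1
            have hre : r = 1 := by omega
            have hnext : chars.getD (i+1) "" ≠ "." := by rw [hre] at hstop; exact hstop
            rw [aLoop]
            simp only [hlen, dif_pos]
            rw [if_neg (by rintro ⟨-, -, hb, -, -⟩; exact hnext hb)]
            rw [hre] at ihtail
            rw [if_neg hr2, ihtail, hre]
            simp only [List.getD] at hc
            simp [hc, List.range_succ]
          · -- run of length ≥ 3: every dot emitted singly
            have hr3 : 3 ≤ r := by omega
            have h1 : chars.getD (i+1) "" = "." := hdots 1 (by omega)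
            have h2 : chars.getD (i+2) "" = "." := hdots 2 (by omega)
            have hi2 : i + 2 < chars.length := by omega
            rw [aLoop]
            simp only [hlen, dif_pos]
            rw [if_neg (by
              rintro ⟨-, -, -, -, hb | hb⟩
              · omega
              · exact hb h2)]
            have hmid := aLoop_midRun chars mapping (r-1) (i+1) (by omega)
              (by simpa using hc)
              (fun k hk => by
                have := hdots (k+1) (by omega)
                rwa [show i + (k+1) = i + 1 + k by omega] at this)
            have harith : i + 1 + (r - 1) = i + r := by omega
            rw [harith] at hmid
            rw [hmid, ihtail, if_neg hr2]
            obtain ⟨r', hr'⟩ : ∃ r', r = r' + 1 := ⟨r - 1, by omega⟩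
            have hsub : r - 1 = r' := by omega
            rw [hsub, hr', map_shift]
            simp only [List.getD] at hc
            simp [hc, List.replicate_succ]
      · -- non-dot character: both emit it directly
        rw [aLoop]
        simp only [hlen, dif_pos]
        rw [if_neg (by rintro ⟨hb, -⟩; rw [hc] at hb; exact hdot hb)]
        rw [hsuffix, bLoop]
        rw [if_pos hdot]
        have ih' := ih (i+1) (by omega) (by
          right; left
          simp only [Nat.add_sub_cancel]
          rw [hc]; exact hdot)
        have : chars.drop (i+1) = rest := by
          have : chars.drop (i+1) = (chars.drop i).drop 1 := by rw [List.drop_drop]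
          rw [this, hsuffix]; simp
        rw [ih', this, hc]
    · rw [aLoop]
      simp [List.drop_eq_nil_of_le (by omega : chars.length ≤ i), bLoop,
        dif_neg (by omega : ¬ i < chars.length)]

-- ===== VERDICT (by name: the statement is the Claim_ definition above) =====
theorem collapse_double_dots_py_spec : Claim_equal_collapse_double_dots_py := by
  intro chars mapping _ _
  unfold Spec_collapse_double_dots_py collapse_double_dots_py collapse_double_dots_py_alt
  rw [aLoop_eq_bLoop chars mapping chars.length 0 (by omega) (Or.inl rfl)]
  simp
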